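-- pv_equiv track=rewrite | github.com/thisjungle/building-construction-toolbox | utils/improved_classification.py | meets_qualifications
-- ===== SOURCE A (Python) =====
-- from typing import Dict, List, Optional, Any, Tuple
--
-- def meets_qualifications(responses: Dict[str, Any], required_quals: List[str]) -> Tuple[bool, List[str]]:
--     """Check if responses meet qualification requirements"""
--     explanations = []
--     qual_level = responses.get('qual_level', 'none')
--     modules_completed = responses.get('modules_completed', 0)
--     qual_pathway = responses.get('qual_pathway', '')
--
--     # Check formal qualifications
--     has_required_qual = False
--     for req_qual in required_quals:
--         if 'trade' in req_qual.lower() and qual_level in ['complete', 'advanced']: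
--             has_required_qual = True
--             break
--         elif 'structured training' in req_qual.lower() and qual_pathway in ['trade', 'advanced_cert']:
--             has_required_qual = True
--             break
--
--     if not has_required_qual:
--         explanations.append("Does not meet qualification requirements")
--
--     return has_required_qual, explanations
-- ===== SOURCE B (Python) =====
-- def meets_qualifications(responses, required_quals):
--     """Check if responses meet qualification requirements"""
--     qual_level = responses.get('qual_level', 'none')
--     qual_pathway = responses.get('qual_pathway', '')
--     # hoist the loop-invariant guards out; two independent scans
--     b1 = qual_level in ('complete', 'advanced') and \
--         any('trade' in q.lower() for q in required_quals)
--     b2 = qual_pathway in ('trade', 'advanced_cert') and \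
--         any('structured training' in q.lower() for q in required_quals)
--     has_required_qual = b1 or b2
--     explanations = [] if has_required_qual else ["Does not meet qualification requirements"]
--     return has_required_qual, explanations
-- ===== Notes on version B (the rewrite author's own statement) =====
-- stated objective: simpler
-- what changed: Replaces the single short-circuiting break-loop over required_quals with two independent boolean scans whose loop-invariant guards (qual_level / qual_pathway membership) are hoisted out of the scan, combined with one 'or'.
import Mathlib
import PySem

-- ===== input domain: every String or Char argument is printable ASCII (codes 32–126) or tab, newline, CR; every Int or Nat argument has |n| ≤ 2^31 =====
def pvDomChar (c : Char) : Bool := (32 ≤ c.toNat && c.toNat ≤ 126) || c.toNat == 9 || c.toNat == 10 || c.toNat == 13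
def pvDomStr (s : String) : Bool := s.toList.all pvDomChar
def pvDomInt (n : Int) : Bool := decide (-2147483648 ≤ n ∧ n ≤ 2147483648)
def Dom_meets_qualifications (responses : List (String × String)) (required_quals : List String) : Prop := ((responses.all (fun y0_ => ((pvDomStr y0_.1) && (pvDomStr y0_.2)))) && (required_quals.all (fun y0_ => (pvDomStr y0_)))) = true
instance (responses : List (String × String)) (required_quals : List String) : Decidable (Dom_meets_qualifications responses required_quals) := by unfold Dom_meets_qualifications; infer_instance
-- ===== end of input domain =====

-- B hoists the loop-invariant membership guards out of A's break-loop into two independent scans combined with 'or' (objective: simpler).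

-- shared helper: Python dict.get(k, dflt) on an insertion-order association list (first match)
def mqGet (d : List (String × String)) (k dflt : String) : String :=
  match d.find? (fun p => p.1 == k) with
  | some p => p.2
  | none => dflt

-- ===== PORT A =====
-- A's break-loop over required_quals (modules_completed is read by A but never used; not ported)
def mqLoopA (quals : List String) (qual_level qual_pathway : String) : Bool :=
  match quals with
  | [] => false
  | q :: rest =>
    if PySem.Str.isIn "trade" (PySem.Str.lower q) &&
       (qual_level == "complete" || qual_level == "advanced") then true
    else if PySem.Str.isIn "structured training" (PySem.Str.lower q) &&
       (qual_pathway == "trade" || qual_pathway == "advanced_cert") then true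
    else mqLoopA rest qual_level qual_pathway

def meets_qualifications (responses : List (String × String)) (required_quals : List String) : Bool × List String :=
  let qual_level := mqGet responses "qual_level" "none"
  let qual_pathway := mqGet responses "qual_pathway" ""
  let has_required_qual := mqLoopA required_quals qual_level qual_pathway
  let explanations : List String :=
    if has_required_qual then [] else ["Does not meet qualification requirements"]
  (has_required_qual, explanations)

-- ===== PORT B =====
def meets_qualifications_alt (responses : List (String × String)) (required_quals : List String) : Bool × List String :=
  let qual_level := mqGet responses "qual_level" "none"
  let qual_pathway := mqGet responses "qual_pathway" ""
  let b1 := (qual_level == "complete" || qual_level == "advanced") &&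
            required_quals.any (fun q => PySem.Str.isIn "trade" (PySem.Str.lower q))
  let b2 := (qual_pathway == "trade" || qual_pathway == "advanced_cert") &&
            required_quals.any (fun q => PySem.Str.isIn "structured training" (PySem.Str.lower q))
  let has_required_qual := b1 || b2
  let explanations : List String :=
    if has_required_qual then [] else ["Does not meet qualification requirements"]
  (has_required_qual, explanations)

-- ===== PRECONDITION & SPEC =====
def Spec_meets_qualifications (responses : List (String × String)) (required_quals : List String) (out : Bool × List String) : Prop := out = meets_qualifications_alt responses required_quals
instance (responses : List (String × String)) (required_quals : List String) (out : Bool × List String) : Decidable (Spec_meets_qualifications responses required_quals out) := by unfold Spec_meets_qualifications; infer_instance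

-- ===== CLAIM (what is proved, stated in full; the proofs are below) =====
def Claim_equal_meets_qualifications : Prop := ∀ (responses : List (String × String)) (required_quals : List String), Dom_meets_qualifications responses required_quals → Spec_meets_qualifications responses required_quals (meets_qualifications responses required_quals)

-- ===== LEMMAS AND PROOFS =====

-- A's break-loop equals B's two invariant-guarded scans
theorem mqLoopA_eq (quals : List String) (l p : String) :
    mqLoopA quals l p =
      (((l == "complete" || l == "advanced") &&
          quals.any (fun q => PySem.Str.isIn "trade" (PySem.Str.lower q))) ||
       ((p == "trade" || p == "advanced_cert") &&
          quals.any (fun q => PySem.Str.isIn "structured training" (PySem.Str.lower q)))) := by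
  induction quals with
  | nil => simp [mqLoopA]
  | cons q rest ih =>
    simp only [mqLoopA, List.any_cons, ih]
    cases PySem.Str.isIn "trade" (PySem.Str.lower q) <;>
      cases PySem.Str.isIn "structured training" (PySem.Str.lower q) <;>
      cases (l == "complete" || l == "advanced") <;>
      cases (p == "trade" || p == "advanced_cert") <;> simp

-- ===== VERDICT (by name: the statement is the Claim_ definition above) =====
theorem meets_qualifications_spec : Claim_equal_meets_qualifications := by
  intro responses required_quals _
  unfold Spec_meets_qualifications meets_qualifications meets_qualifications_alt
  simp only [mqLoopA_eq]
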